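-- pv_equiv track=rewrite | github.com/bartoszkam96/text-generator | main.py | tritails
-- ===== SOURCE A (Python) =====
-- def tritails(trigramlist):
--     tailsdict = {}
--     for x in trigramlist:
--         head = x.split(" ")[0] + " " + x.split(" ")[1]
--         tailsdict[head] = {}
--
--     for x in trigramlist:
--         head = x.split(" ")[0] + " " + x.split(" ")[1]
--         tail = x.split(" ")[2]
--         if tail in tailsdict[head]:
--             x = tailsdict[head][tail]
--             tailsdict[head][tail] = x + 1
--         else:
--             tailsdict[head][tail] = 1
--     return tailsdict
-- ===== SOURCE B (Python) =====
-- def tritails(trigramlist):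
--     # One pass over the trigrams keeps a FLAT counter keyed by the (head, tail)
--     # pair plus an order index head -> tails in first-occurrence order; the
--     # nested dict is assembled from these two flat structures at the end.
--     counts = {}
--     order = {}
--     for x in trigramlist:
--         p = x.split(" ")
--         head, tail = p[0] + " " + p[1], p[2]
--         if (head, tail) in counts:
--             counts[(head, tail)] = counts[(head, tail)] + 1
--         else:
--             counts[(head, tail)] = 1
--             order.setdefault(head, []).append(tail)
--     return {h: {t: counts[(h, t)] for t in ts} for h, ts in order.items()}
-- ===== Notes on version B (the rewrite author's own statement) =====
-- stated objective: alternative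
-- what changed: Instead of A's two passes mutating a nested dict-of-dicts, B makes one pass that maintains a flat counter keyed by the (head, tail) pair together with an order index head -> first-occurrence tail list, and assembles the nested result from those two flat structures at the end.
import Mathlib
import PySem

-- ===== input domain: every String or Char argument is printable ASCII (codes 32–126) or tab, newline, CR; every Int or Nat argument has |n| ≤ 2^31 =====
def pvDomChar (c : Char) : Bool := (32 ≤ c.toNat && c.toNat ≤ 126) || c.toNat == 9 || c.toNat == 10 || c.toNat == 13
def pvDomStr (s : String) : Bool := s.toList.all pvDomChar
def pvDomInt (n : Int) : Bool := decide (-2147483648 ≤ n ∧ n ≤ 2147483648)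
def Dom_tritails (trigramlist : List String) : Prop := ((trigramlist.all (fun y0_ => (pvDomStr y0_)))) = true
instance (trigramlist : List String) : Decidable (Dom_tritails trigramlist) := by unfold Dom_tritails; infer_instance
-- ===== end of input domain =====

-- B replaces A's two passes over a nested dict-of-dicts by one pass keeping a flat
-- (head, tail)-keyed counter plus an order index head -> first-seen tails, assembled at the end;
-- return values proved equal on all inputs where A returns.

-- ===== PORT A =====
def tritails (trigramlist : List String) : List (String × List (String × Int)) :=
  let tailsdict : PySem.Dict String (PySem.Dict String Int) :=
    trigramlist.foldl (fun d x =>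
      let head := PySem.List.pyGetD ((PySem.Str.split? x " ").getD []) 0 ""
                    ++ " " ++ PySem.List.pyGetD ((PySem.Str.split? x " ").getD []) 1 ""
      d.insert head PySem.Dict.empty) PySem.Dict.empty
  let tailsdict2 :=
    trigramlist.foldl (fun d x =>
      let head := PySem.List.pyGetD ((PySem.Str.split? x " ").getD []) 0 ""
                    ++ " " ++ PySem.List.pyGetD ((PySem.Str.split? x " ").getD []) 1 ""
      let tail := PySem.List.pyGetD ((PySem.Str.split? x " ").getD []) 2 ""
      let inner := d.getD head PySem.Dict.empty
      if inner.contains tail then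
        let c := inner.getD tail 0
        d.insert head (inner.insert tail (c + 1))
      else
        d.insert head (inner.insert tail 1)) tailsdict
  tailsdict2.items.map (fun p => (p.1, p.2.items))

-- ===== PORT B =====
def tritails_alt (trigramlist : List String) : List (String × List (String × Int)) :=
  let st :=
    trigramlist.foldl
      (fun (st : PySem.Dict (String × String) Int × PySem.Dict String (List String)) x =>
        let p := (PySem.Str.split? x " ").getD []
        let head := PySem.List.pyGetD p 0 "" ++ " " ++ PySem.List.pyGetD p 1 ""
        let tail := PySem.List.pyGetD p 2 ""
        if st.1.contains (head, tail) then
          (st.1.insert (head, tail) (st.1.getD (head, tail) 0 + 1), st.2)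
        else
          (st.1.insert (head, tail) 1, st.2.modify head [] (fun l => l ++ [tail])))
      (PySem.Dict.empty, PySem.Dict.empty)
  let result : PySem.Dict String (PySem.Dict String Int) :=
    st.2.items.foldl (fun res p =>
        res.insert p.1 (p.2.foldl (fun d t => d.insert t (st.1.getD (p.1, t) 0)) PySem.Dict.empty))
      PySem.Dict.empty
  result.items.map (fun p => (p.1, p.2.items))

-- ===== PRECONDITION & SPEC =====
-- Pre_ excludes exactly the inputs where the Python A raises IndexError: some element whose
-- split(" ") has fewer than three pieces (no third word to count as a tail).
def Pre_tritails (trigramlist : List String) : Prop :=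
  ∀ x ∈ trigramlist, 3 ≤ ((PySem.Str.split? x " ").getD []).length
instance (trigramlist : List String) : Decidable (Pre_tritails trigramlist) := by
  unfold Pre_tritails; infer_instance
def pvWitness_tritails : List String := ["the cat sat", "the cat ran", "a b c d"]
def Spec_tritails (trigramlist : List String) (out : List (String × List (String × Int))) : Prop := out = tritails_alt trigramlist
instance (trigramlist : List String) (out : List (String × List (String × Int))) : Decidable (Spec_tritails trigramlist out) := by unfold Spec_tritails; infer_instance

-- ===== CLAIM (what is proved, stated in full; the proofs are below) =====
def Claim_equal_tritails : Prop := ∀ (trigramlist : List String), Dom_tritails trigramlist → Pre_tritails trigramlist → Spec_tritails trigramlist (tritails trigramlist)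

-- ===== LEMMAS AND PROOFS =====

-- the head bigram and tail of a trigram string, exactly as both ports compute them
def pvHead (x : String) : String :=
  PySem.List.pyGetD ((PySem.Str.split? x " ").getD []) 0 ""
    ++ " " ++ PySem.List.pyGetD ((PySem.Str.split? x " ").getD []) 1 ""

def pvTail (x : String) : String := PySem.List.pyGetD ((PySem.Str.split? x " ").getD []) 2 ""

def pvPairs (l : List String) : List (String × String) := l.map (fun x => (pvHead x, pvTail x))

-- tails attached to head h, in order
def pvTails (ps : List (String × String)) (h : String) : List String :=
  (ps.filter (fun q => q.1 == h)).map Prod.snd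

-- A's initialization pass as repeated setdefault
def pvPad (l : List String) (d : PySem.Dict String (PySem.Dict String Int)) :
    PySem.Dict String (PySem.Dict String Int) :=
  l.foldl (fun d x => d.setdefault (pvHead x) PySem.Dict.empty) d

-- A's single-pass form, per (head, tail) pair
def pvStepA (d : PySem.Dict String (PySem.Dict String Int)) (p : String × String) :
    PySem.Dict String (PySem.Dict String Int) :=
  let d1 := d.setdefault p.1 PySem.Dict.empty
  let inner := d1.getD p.1 PySem.Dict.empty
  d1.insert p.1 (inner.insert p.2 (inner.getD p.2 0 + 1))

-- B's single-pass step, per (head, tail) pair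
def pvStepB (st : PySem.Dict (String × String) Int × PySem.Dict String (List String))
    (q : String × String) :
    PySem.Dict (String × String) Int × PySem.Dict String (List String) :=
  if st.1.contains q then (st.1.insert q (st.1.getD q 0 + 1), st.2)
  else (st.1.insert q 1, st.2.modify q.1 [] (fun l => l ++ [q.2]))

-- replacing one list entry keyed k by (k, v) is the identity when (k, v) is already there (nodup keys)
lemma pvMapReplace {κ ν : Type} [BEq κ] [LawfulBEq κ] (l : List (κ × ν)) (k : κ) (v : ν)
    (hnd : (l.map Prod.fst).Nodup) (hmem : (k, v) ∈ l) :
    l.map (fun p => if (p.1 == k) = true then (k, v) else p) = l := by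
  induction l with
  | nil => simp at hmem
  | cons p t ih =>
    simp only [List.map_cons, List.nodup_cons] at hnd
    rcases List.mem_cons.mp hmem with h | h
    · have hmap : t.map (fun q : κ × ν => if (q.1 == k) = true then (k, v) else q) = t := by
        have hid : ∀ q ∈ t, (fun q : κ × ν => if (q.1 == k) = true then (k, v) else q) q = q := by
          intro q hq
          have hqk : q.1 ≠ k := by
            intro he
            apply hnd.1
            have hp1 : p.1 = k := by rw [← h]
            rw [hp1, ← he]
            exact List.mem_map_of_mem hq
          simp [beq_eq_false_iff_ne.mpr hqk]
        rw [List.map_congr_left hid, List.map_id']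
      simp only [List.map_cons, hmap, ← h]
      simp
    · have hp : (p.1 == k) = false := by
        apply beq_eq_false_iff_ne.mpr
        intro he
        apply hnd.1
        rw [he]
        exact List.mem_map_of_mem h
      simp only [List.map_cons, hp, Bool.false_eq_true, if_false]
      rw [ih hnd.2 h]

-- inserting a key's current value back is the identity (nodup keys)
lemma pvInsertSelf {κ ν : Type} [BEq κ] [LawfulBEq κ] (d : PySem.Dict κ ν) (k : κ) (v : ν)
    (hnd : d.keys.Nodup) (h : d.get? k = some v) : d.insert k v = d := by
  have hc : d.contains k = true := by
    rw [PySem.Dict.contains_eq_isSome_get?, h]; rfl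
  have hmem : (k, v) ∈ d.items := PySem.Dict.mem_items_of_get?_eq_some d h
  apply PySem.Dict.ext
  rw [PySem.Dict.items_insert_of_contains d v hc]
  exact pvMapReplace d.items k v hnd hmem

-- insert at a PRESENT key commutes with insert at any other key, as dicts (order preserved)
lemma pvInsertComm {κ ν : Type} [BEq κ] [LawfulBEq κ] (d : PySem.Dict κ ν) (k k' : κ) (v w : ν)
    (hk : d.contains k = true) (hne : k ≠ k') :
    (d.insert k' w).insert k v = (d.insert k v).insert k' w := by
  have hbne : (k' == k) = false := beq_eq_false_iff_ne.mpr (Ne.symm hne)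
  have hbne' : (k == k') = false := beq_eq_false_iff_ne.mpr hne
  have hk1 : (d.insert k' w).contains k = true := by
    rw [PySem.Dict.contains_insert]; simp [hk]
  cases hk' : d.contains k' with
  | true =>
    have hk'2 : (d.insert k v).contains k' = true := by
      rw [PySem.Dict.contains_insert]; simp [hk']
    apply PySem.Dict.ext
    rw [PySem.Dict.items_insert_of_contains _ v hk1,
        PySem.Dict.items_insert_of_contains _ w hk',
        PySem.Dict.items_insert_of_contains _ w hk'2,
        PySem.Dict.items_insert_of_contains _ v hk]
    rw [List.map_map, List.map_map]
    apply List.map_congr_left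
    intro p _
    simp only [Function.comp]
    by_cases h1 : (p.1 == k') = true
    · have hpk : (p.1 == k) = false := by
        apply beq_eq_false_iff_ne.mpr
        rw [eq_of_beq h1]
        exact Ne.symm hne
      simp [h1, hpk, hbne]
    · by_cases h2 : (p.1 == k) = true
      · simp [h1, h2, hbne']
      · simp [h1, h2]
  | false =>
    have hk'2 : (d.insert k v).contains k' = false := by
      rw [PySem.Dict.contains_insert, hbne, hk']; rfl
    apply PySem.Dict.ext
    rw [PySem.Dict.items_insert_of_contains _ v hk1,
        PySem.Dict.items_insert_of_not_contains _ w hk',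
        PySem.Dict.items_insert_of_not_contains _ w hk'2,
        PySem.Dict.items_insert_of_contains _ v hk]
    rw [List.map_append]
    simp [hbne]

-- insert at a PRESENT key commutes with setdefault at any key
lemma pvInsertSetdefault {κ ν : Type} [BEq κ] [LawfulBEq κ] (d : PySem.Dict κ ν) (k k' : κ) (v w : ν)
    (hk : d.contains k = true) :
    (d.setdefault k' w).insert k v = (d.insert k v).setdefault k' w := by
  cases hk' : d.contains k' with
  | true =>
    rw [PySem.Dict.setdefault_of_contains d w hk',
        PySem.Dict.setdefault_of_contains _ w (by
          rw [PySem.Dict.contains_insert, hk']; simp)]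
  | false =>
    have hne : k ≠ k' := by intro he; rw [he, hk'] at hk; simp at hk
    rw [PySem.Dict.setdefault_of_not_contains d w hk',
        PySem.Dict.setdefault_of_not_contains _ w (by
          rw [PySem.Dict.contains_insert, hk', beq_eq_false_iff_ne.mpr (Ne.symm hne)]; rfl)]
    exact pvInsertComm d k k' v w hk hne

lemma pvPad_getD (l : List String) (d : PySem.Dict String (PySem.Dict String Int)) (k : String)
    (dflt : PySem.Dict String Int) (hk : d.contains k = true) :
    (pvPad l d).getD k dflt = d.getD k dflt := by
  induction l generalizing d with
  | nil => rfl
  | cons y t ih =>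
    simp only [pvPad, List.foldl_cons]
    have hstep : (d.setdefault (pvHead y) PySem.Dict.empty).getD k dflt = d.getD k dflt := by
      cases hy : d.contains (pvHead y) with
      | true => rw [PySem.Dict.setdefault_of_contains _ _ hy]
      | false =>
        have hne : k ≠ pvHead y := by
          intro he; rw [he, hy] at hk; simp at hk
        rw [PySem.Dict.setdefault_of_not_contains _ _ hy,
            PySem.Dict.getD_insert_of_ne _ _ _ hne]
    have hc : (d.setdefault (pvHead y) PySem.Dict.empty).contains k = true := by
      rw [PySem.Dict.contains_setdefault, hk]; simp
    rw [show (t.foldl (fun d x => d.setdefault (pvHead x) PySem.Dict.empty)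
              (d.setdefault (pvHead y) PySem.Dict.empty))
          = pvPad t (d.setdefault (pvHead y) PySem.Dict.empty) from rfl]
    rw [ih _ hc, hstep]

lemma pvPad_insert (l : List String) (d : PySem.Dict String (PySem.Dict String Int)) (k : String)
    (v : PySem.Dict String Int) (hk : d.contains k = true) :
    (pvPad l d).insert k v = pvPad l (d.insert k v) := by
  induction l generalizing d with
  | nil => rfl
  | cons y t ih =>
    simp only [pvPad, List.foldl_cons] at *
    have hc : (d.setdefault (pvHead y) PySem.Dict.empty).contains k = true := by
      rw [PySem.Dict.contains_setdefault, hk]; simp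
    rw [ih _ hc, pvInsertSetdefault d k (pvHead y) v PySem.Dict.empty hk]

-- A's init pass equals pvPad on a dict whose values are all empty (with nodup keys)
lemma pvInit_eq_pad (l : List String) (d : PySem.Dict String (PySem.Dict String Int))
    (hnd : d.keys.Nodup) (hempty : ∀ p ∈ d.items, p.2 = PySem.Dict.empty) :
    l.foldl (fun d x => d.insert (pvHead x) PySem.Dict.empty) d = pvPad l d := by
  induction l generalizing d with
  | nil => rfl
  | cons x t ih =>
    simp only [pvPad, List.foldl_cons] at *
    cases hc : d.contains (pvHead x) with
    | true =>
      obtain ⟨v, hv⟩ : ∃ v, d.get? (pvHead x) = some v := by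
        have := PySem.Dict.contains_eq_isSome_get? d (pvHead x)
        rw [hc] at this
        exact Option.isSome_iff_exists.mp this.symm
      have hve : v = PySem.Dict.empty :=
        hempty _ (PySem.Dict.mem_items_of_get?_eq_some d hv)
      rw [show d.insert (pvHead x) PySem.Dict.empty = d from
            hve ▸ pvInsertSelf d (pvHead x) v hnd hv,
          PySem.Dict.setdefault_of_contains _ _ hc]
      exact ih d hnd hempty
    | false =>
      rw [← PySem.Dict.setdefault_of_not_contains d PySem.Dict.empty hc]
      apply ih
      · rw [PySem.Dict.setdefault_of_not_contains d PySem.Dict.empty hc]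
        exact PySem.Dict.nodup_keys_insert d _ _ hnd
      · intro p hp
        rw [PySem.Dict.setdefault_of_not_contains d PySem.Dict.empty hc,
            PySem.Dict.items_insert_of_not_contains d _ hc] at hp
        rcases List.mem_append.mp hp with h | h
        · exact hempty p h
        · simp only [List.mem_singleton] at h; rw [h]

-- A's counting pass started from the padded dict equals the single setdefault pass
lemma pvMain (l : List String) (d0 : PySem.Dict String (PySem.Dict String Int)) :
    l.foldl (fun d x =>
      let inner := d.getD (pvHead x) PySem.Dict.empty
      if inner.contains (pvTail x) then
        d.insert (pvHead x) (inner.insert (pvTail x) (inner.getD (pvTail x) 0 + 1))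
      else
        d.insert (pvHead x) (inner.insert (pvTail x) 1)) (pvPad l d0)
    = l.foldl (fun d x =>
        let d1 := d.setdefault (pvHead x) PySem.Dict.empty
        let inner := d1.getD (pvHead x) PySem.Dict.empty
        d1.insert (pvHead x) (inner.insert (pvTail x) (inner.getD (pvTail x) 0 + 1))) d0 := by
  induction l generalizing d0 with
  | nil => rfl
  | cons x t ih =>
    simp only [List.foldl_cons]
    have hpad : pvPad (x :: t) d0 = pvPad t (d0.setdefault (pvHead x) PySem.Dict.empty) := rfl
    rw [hpad]
    set d1 := d0.setdefault (pvHead x) PySem.Dict.empty with hd1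
    have hc1 : d1.contains (pvHead x) = true := by
      rw [hd1, PySem.Dict.contains_setdefault]; simp
    have hinner : (pvPad t d1).getD (pvHead x) PySem.Dict.empty
        = d1.getD (pvHead x) PySem.Dict.empty := pvPad_getD t d1 _ _ hc1
    set inner := d1.getD (pvHead x) PySem.Dict.empty with hi
    have hstep : (let inner' := (pvPad t d1).getD (pvHead x) PySem.Dict.empty
        if inner'.contains (pvTail x) then
          (pvPad t d1).insert (pvHead x) (inner'.insert (pvTail x) (inner'.getD (pvTail x) 0 + 1))
        else
          (pvPad t d1).insert (pvHead x) (inner'.insert (pvTail x) 1))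
        = pvPad t (d1.insert (pvHead x) (inner.insert (pvTail x) (inner.getD (pvTail x) 0 + 1))) := by
      simp only [hinner]
      have hcomm := pvPad_insert t d1 (pvHead x)
        (inner.insert (pvTail x) (inner.getD (pvTail x) 0 + 1)) hc1
      cases hct : inner.contains (pvTail x) with
      | true => exact hcomm
      | false =>
        simp only [Bool.false_eq_true, if_false]
        rw [PySem.Dict.getD_of_not_contains inner 0 hct, zero_add]
        exact pvPad_insert t d1 (pvHead x) (inner.insert (pvTail x) 1) hc1
    rw [hstep]
    exact ih _

-- counter over an appended element, in insert form
lemma pvCounterSnoc {κ : Type} [BEq κ] (ts : List κ) (t : κ) :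
    PySem.Dict.counter (ts ++ [t])
      = (PySem.Dict.counter ts).insert t ((PySem.Dict.counter ts).getD t 0 + 1) := by
  rw [← PySem.Dict.foldl_insert_getD_add_one_eq_counter (ts ++ [t]),
      ← PySem.Dict.foldl_insert_getD_add_one_eq_counter ts, List.foldl_append]
  rfl

lemma pvTails_append (ps : List (String × String)) (p : String × String) (h : String) :
    pvTails (ps ++ [p]) h = pvTails ps h ++ (if p.1 = h then [p.2] else []) := by
  simp only [pvTails, List.filter_append, List.map_append]
  by_cases hp : p.1 = h
  · simp [hp]
  · simp [List.filter, beq_eq_false_iff_ne.mpr hp, hp]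

lemma pvMemTails (ps : List (String × String)) (p : String × String) :
    p.2 ∈ pvTails ps p.1 ↔ p ∈ ps := by
  simp only [pvTails, List.mem_map, List.mem_filter]
  constructor
  · rintro ⟨q, ⟨hq, hq1⟩, hq2⟩
    have : q = p := Prod.ext (eq_of_beq hq1) hq2
    rwa [this] at hq
  · intro hp
    exact ⟨p, ⟨hp, by simp⟩, rfl⟩

lemma pvOfListSnoc {α : Type} [BEq α] (xs : List α) (x : α) :
    PySem.Set.ofList (xs ++ [x]) = PySem.Set.add (PySem.Set.ofList xs) x := by
  simp only [PySem.Set.ofList, List.foldl_append]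
  rfl

lemma pvSetContains {α : Type} [BEq α] [LawfulBEq α] (s : PySem.Set α) (x : α) :
    PySem.Set.contains s x = decide (x ∈ s) := by
  simp [PySem.Set.contains, List.contains_eq_mem]

-- the characterization of A's single pass: heads in first-occurrence order, tails counted
lemma pvAfold (ps : List (String × String)) :
    (ps.foldl pvStepA PySem.Dict.empty).items
      = (PySem.Set.ofList (ps.map Prod.fst)).map
          (fun h => (h, PySem.Dict.counter (pvTails ps h))) := by
  induction ps using List.reverseRecOn with
  | nil => rfl
  | append_singleton ts p ih =>
    rw [List.foldl_append, List.foldl_cons, List.foldl_nil]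
    set D := ts.foldl pvStepA PySem.Dict.empty with hD
    set S := PySem.Set.ofList (ts.map Prod.fst) with hS
    have hkeys : D.keys = S := by
      show D.items.map Prod.fst = S
      rw [ih, List.map_map]
      simp [Function.comp_def]
    have hnd : D.keys.Nodup := by rw [hkeys]; exact PySem.Set.nodup_ofList _
    have hS' : PySem.Set.ofList ((ts ++ [p]).map Prod.fst) = PySem.Set.add S p.1 := by
      rw [List.map_append]; exact pvOfListSnoc _ _
    have hcont : D.contains p.1 = decide (p.1 ∈ S) := by
      rw [PySem.Dict.contains_eq_decide_mem_keys, hkeys]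
    by_cases hmem : p.1 ∈ S
    · -- existing head: setdefault is the identity, the inner counter gains p.2
      have hc : D.contains p.1 = true := by rw [hcont]; simp [hmem]
      have hinner : D.getD p.1 PySem.Dict.empty = PySem.Dict.counter (pvTails ts p.1) := by
        apply PySem.Dict.getD_of_mem_items D _ hnd
        rw [ih]
        exact List.mem_map_of_mem hmem
      have hstep : pvStepA D p
          = D.insert p.1 (PySem.Dict.counter (pvTails (ts ++ [p]) p.1)) := by
        simp only [pvStepA, PySem.Dict.setdefault_of_contains D _ hc, hinner,
          pvTails_append, if_true, pvCounterSnoc]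
      rw [hstep, PySem.Dict.items_insert_of_contains D _ hc, ih, List.map_map, hS']
      have hadd : PySem.Set.add S p.1 = S := by
        have : S.contains p.1 = true := by
          rw [pvSetContains]; simpa using hmem
        simp only [PySem.Set.add, this]
        simp
      rw [hadd]
      apply List.map_congr_left
      intro h hh
      by_cases hhp : h = p.1
      · simp [Function.comp, hhp]
      · have : (h == p.1) = false := beq_eq_false_iff_ne.mpr hhp
        simp [Function.comp, this, pvTails_append, Ne.symm hhp]
    · -- new head: an entry is appended
      have hc : D.contains p.1 = false := by rw [hcont]; simp [hmem]
      have hnotin : p.1 ∉ ts.map Prod.fst := fun hin =>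
        hmem ((PySem.Set.mem_ofList _ _).mpr hin)
      have htails : pvTails ts p.1 = [] := by
        simp only [pvTails, List.map_eq_nil_iff, List.filter_eq_nil_iff]
        intro q hq
        simp only [beq_iff_eq]
        intro he
        exact hnotin (he ▸ List.mem_map_of_mem hq)
      have hstep : pvStepA D p
          = D.insert p.1 (PySem.Dict.counter (pvTails (ts ++ [p]) p.1)) := by
        simp only [pvStepA, PySem.Dict.setdefault_of_not_contains D _ hc,
          PySem.Dict.getD_insert_self, PySem.Dict.insert_insert_self,
          pvTails_append, htails, List.nil_append]
        norm_num [PySem.Dict.counter, PySem.Dict.modify]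
      rw [hstep, PySem.Dict.items_insert_of_not_contains D _ hc, ih, hS']
      have hadd : PySem.Set.add S p.1 = S ++ [p.1] := by
        have : S.contains p.1 = false := by
          rw [pvSetContains]; simpa using hmem
        simp only [PySem.Set.add, this]
        simp
      rw [hadd, List.map_append]
      congr 1
      apply List.map_congr_left
      intro h hh
      have hhp : p.1 ≠ h := fun he => hmem (he ▸ hh)
      simp [pvTails_append, hhp]

-- the characterization of B's single pass: flat counter of pairs + order index
lemma pvBInv (ps : List (String × String)) :
    (ps.foldl pvStepB (PySem.Dict.empty, PySem.Dict.empty)).1 = PySem.Dict.counter ps ∧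
    (ps.foldl pvStepB (PySem.Dict.empty, PySem.Dict.empty)).2.items
      = (PySem.Set.ofList (ps.map Prod.fst)).map
          (fun h => (h, (PySem.Set.ofList (pvTails ps h) : List String))) := by
  induction ps using List.reverseRecOn with
  | nil => exact ⟨rfl, rfl⟩
  | append_singleton ts q ih =>
    rw [List.foldl_append, List.foldl_cons, List.foldl_nil]
    obtain ⟨ih1, ih2⟩ := ih
    set st := ts.foldl pvStepB (PySem.Dict.empty, PySem.Dict.empty) with hst
    set S := PySem.Set.ofList (ts.map Prod.fst) with hS
    have hkeys : st.2.keys = S := by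
      show st.2.items.map Prod.fst = S
      rw [ih2, List.map_map]; simp [Function.comp_def]
    have hnd : st.2.keys.Nodup := by rw [hkeys]; exact PySem.Set.nodup_ofList _
    have hS' : PySem.Set.ofList ((ts ++ [q]).map Prod.fst) = PySem.Set.add S q.1 := by
      rw [List.map_append]; exact pvOfListSnoc _ _
    have hcontc : st.1.contains q = ts.contains q := by
      rw [ih1]; exact PySem.Dict.contains_counter ts q
    by_cases hq : q ∈ ts
    · -- repeated pair: only the flat counter changes
      have hc : st.1.contains q = true := by
        rw [hcontc, List.contains_eq_mem]; simp [hq]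
      have hred : pvStepB st q = (st.1.insert q (st.1.getD q 0 + 1), st.2) := by
        simp [pvStepB, hc]
      have h1 : (pvStepB st q).1 = PySem.Dict.counter (ts ++ [q]) := by
        rw [hred, pvCounterSnoc, ← ih1]
      have h2 : (pvStepB st q).2 = st.2 := by rw [hred]
      refine ⟨h1, ?_⟩
      rw [h2, ih2, hS']
      have hadd : PySem.Set.add S q.1 = S := by
        have : S.contains q.1 = true := by
          rw [pvSetContains]
          simpa using (PySem.Set.mem_ofList _ _).mpr (List.mem_map_of_mem hq)
        simp only [PySem.Set.add, this]
        simp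
      rw [hadd]
      apply List.map_congr_left
      intro h hh
      by_cases hhq : q.1 = h
      · subst hhq
        have hmem2 : q.2 ∈ pvTails ts q.1 := (pvMemTails ts q).mpr hq
        have : (PySem.Set.ofList (pvTails ts q.1)).contains q.2 = true := by
          rw [pvSetContains]
          simpa using (PySem.Set.mem_ofList _ _).mpr hmem2
        simp only [pvTails_append, if_true, pvOfListSnoc, PySem.Set.add, this]
      · simp [pvTails_append, hhq]
    · -- new pair: counter gains key q, the order index gets q.2 appended under q.1
      have hc : st.1.contains q = false := by
        rw [hcontc, List.contains_eq_mem]; simp [hq]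
      have hred : pvStepB st q = (st.1.insert q 1, st.2.modify q.1 [] (fun l => l ++ [q.2])) := by
        simp [pvStepB, hc]
      have h1 : (pvStepB st q).1 = PySem.Dict.counter (ts ++ [q]) := by
        have hcount : (PySem.Dict.counter ts).getD q 0 = 0 := by
          rw [PySem.Dict.getD_counter]
          simp [List.count_eq_zero.mpr hq]
        rw [hred, pvCounterSnoc, hcount, zero_add, ← ih1]
      have h2 : (pvStepB st q).2 = st.2.insert q.1 (st.2.getD q.1 [] ++ [q.2]) := by
        rw [hred]; simp [PySem.Dict.modify]
      refine ⟨h1, ?_⟩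
      rw [h2]
      by_cases hmem : q.1 ∈ S
      · -- head already present: its tail list is replaced in place
        have hcd : st.2.contains q.1 = true := by
          rw [PySem.Dict.contains_eq_decide_mem_keys, hkeys]; simp [hmem]
        have hgetD : st.2.getD q.1 [] = (PySem.Set.ofList (pvTails ts q.1) : List String) := by
          apply PySem.Dict.getD_of_mem_items st.2 _ hnd
          rw [ih2]
          exact List.mem_map_of_mem hmem
        have hnotmem2 : q.2 ∉ pvTails ts q.1 := fun hin => hq ((pvMemTails ts q).mp hin)
        have hvals : st.2.getD q.1 [] ++ [q.2]
            = (PySem.Set.ofList (pvTails (ts ++ [q]) q.1) : List String) := by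
          rw [hgetD, pvTails_append, if_pos rfl, pvOfListSnoc]
          have : (PySem.Set.ofList (pvTails ts q.1)).contains q.2 = false := by
            rw [pvSetContains]
            simp only [decide_eq_false_iff_not]
            exact fun hin => hnotmem2 ((PySem.Set.mem_ofList _ _).mp hin)
          simp only [PySem.Set.add, this]
          simp
        rw [hvals, PySem.Dict.items_insert_of_contains _ _ hcd, ih2, List.map_map, hS']
        have hadd : PySem.Set.add S q.1 = S := by
          have : S.contains q.1 = true := by
            rw [pvSetContains]; simpa using hmem
          simp only [PySem.Set.add, this]
          simp
        rw [hadd]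
        apply List.map_congr_left
        intro h hh
        by_cases hhq : h = q.1
        · simp [Function.comp, hhq]
        · have : (h == q.1) = false := beq_eq_false_iff_ne.mpr hhq
          simp [Function.comp, this, pvTails_append, Ne.symm hhq]
      · -- brand-new head: an entry is appended
        have hcd : st.2.contains q.1 = false := by
          rw [PySem.Dict.contains_eq_decide_mem_keys, hkeys]; simp [hmem]
        have hnotin : q.1 ∉ ts.map Prod.fst := fun hin =>
          hmem ((PySem.Set.mem_ofList _ _).mpr hin)
        have htails : pvTails ts q.1 = [] := by
          simp only [pvTails, List.map_eq_nil_iff, List.filter_eq_nil_iff]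
          intro r hr
          simp only [beq_iff_eq]
          intro he
          exact hnotin (he ▸ List.mem_map_of_mem hr)
        have hgetD : st.2.getD q.1 [] = [] := PySem.Dict.getD_of_not_contains st.2 [] hcd
        rw [PySem.Dict.items_insert_of_not_contains _ _ hcd, ih2, hS']
        have hadd : PySem.Set.add S q.1 = S ++ [q.1] := by
          have : S.contains q.1 = false := by
            rw [pvSetContains]; simpa using hmem
          simp only [PySem.Set.add, this]
          simp
        rw [hadd, List.map_append]
        congr 1
        · apply List.map_congr_left
          intro h hh
          have hhq : q.1 ≠ h := fun he => hmem (he ▸ hh)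
          simp [pvTails_append, hhq]
        · simp [hgetD, pvTails_append, htails, PySem.Set.ofList, PySem.Set.add,
            PySem.Set.empty, PySem.Set.contains]

-- the tail count within a head group equals the flat pair count
lemma pvCountTails (ps : List (String × String)) (h : String) (t : String) :
    List.count t (pvTails ps h) = List.count (h, t) ps := by
  induction ps with
  | nil => rfl
  | cons r ps ih =>
    by_cases hr : r.1 = h
    · have : pvTails (r :: ps) h = r.2 :: pvTails ps h := by
        simp [pvTails, hr]
      rw [this, List.count_cons, List.count_cons, ih]
      by_cases ht : r.2 = t
      · have : r = (h, t) := Prod.ext hr ht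
        simp [this]
      · have h1 : (r.2 == t) = false := beq_eq_false_iff_ne.mpr ht
        have h2 : (r == (h, t)) = false := by
          apply beq_eq_false_iff_ne.mpr
          intro he; exact ht (by rw [he])
        simp [h1, h2]
    · have : pvTails (r :: ps) h = pvTails ps h := by
        simp [pvTails, beq_eq_false_iff_ne.mpr hr]
      rw [this, List.count_cons, ih]
      have h2 : (r == (h, t)) = false := by
        apply beq_eq_false_iff_ne.mpr
        intro he; exact hr (by rw [he])
      simp [h2]

-- B's final assembly builds exactly the counters of the tail groups
lemma pvAssemble (ps : List (String × String)) :
    (let st := ps.foldl pvStepB (PySem.Dict.empty, PySem.Dict.empty)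
     (st.2.items.foldl (fun res p =>
         res.insert p.1 (p.2.foldl (fun d t => d.insert t (st.1.getD (p.1, t) 0)) PySem.Dict.empty))
       (PySem.Dict.empty : PySem.Dict String (PySem.Dict String Int))).items)
      = (PySem.Set.ofList (ps.map Prod.fst)).map
          (fun h => (h, PySem.Dict.counter (pvTails ps h))) := by
  obtain ⟨h1, h2⟩ := pvBInv ps
  set st := ps.foldl pvStepB (PySem.Dict.empty, PySem.Dict.empty) with hst
  show (st.2.items.foldl (fun res p =>
      res.insert p.1 (p.2.foldl (fun d t => d.insert t (st.1.getD (p.1, t) 0)) PySem.Dict.empty))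
    (PySem.Dict.empty : PySem.Dict String (PySem.Dict String Int))).items = _
  have hkeys : st.2.items.map Prod.fst = PySem.Set.ofList (ps.map Prod.fst) := by
    rw [h2, List.map_map]; simp [Function.comp_def]
  have houter := PySem.Dict.items_foldl_insert_fresh st.2.items Prod.fst
    (fun p => p.2.foldl (fun d t => d.insert t (st.1.getD (p.1, t) 0)) PySem.Dict.empty)
    PySem.Dict.empty (fun a _ => PySem.Dict.contains_empty _)
    (by rw [hkeys]; exact PySem.Set.nodup_ofList _)
  rw [houter, h2, List.map_map,
    show (PySem.Dict.empty : PySem.Dict String (PySem.Dict String Int)).items = [] from rfl,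
    List.nil_append]
  apply List.map_congr_left
  intro h hh
  simp only [Function.comp]
  congr 1
  apply PySem.Dict.ext
  have hinner := PySem.Dict.items_foldl_insert_fresh
    (PySem.Set.ofList (pvTails ps h) : List String) id
    (fun t => st.1.getD (h, t) 0) PySem.Dict.empty
    (fun a _ => PySem.Dict.contains_empty _)
    (by rw [List.map_id]; exact PySem.Set.nodup_ofList _)
  simp only [id] at hinner
  rw [hinner, show (PySem.Dict.empty : PySem.Dict String Int).items = [] from rfl,
    List.nil_append, PySem.Dict.items_counter]
  apply List.map_congr_left
  intro t _
  rw [h1, PySem.Dict.getD_counter, pvCountTails]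

-- ===== VERDICT (by name: the statement is the Claim_ definition above) =====
theorem tritails_spec : Claim_equal_tritails := by
  intro l _ _
  show tritails l = tritails_alt l
  have h0 := pvInit_eq_pad l PySem.Dict.empty (by simp [PySem.Dict.keys, PySem.Dict.empty])
    (by simp [PySem.Dict.empty])
  have h := pvMain l PySem.Dict.empty
  simp only [pvHead] at h0
  simp only [pvHead, pvTail] at h
  simp only [tritails, tritails_alt]
  rw [h0, h]
  have hA : (l.foldl (fun d x =>
        let d1 := d.setdefault (pvHead x) PySem.Dict.empty
        let inner := d1.getD (pvHead x) PySem.Dict.empty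
        d1.insert (pvHead x) (inner.insert (pvTail x) (inner.getD (pvTail x) 0 + 1)))
      PySem.Dict.empty)
      = (pvPairs l).foldl pvStepA PySem.Dict.empty := by
    rw [pvPairs, List.foldl_map]
    rfl
  have hB : (l.foldl
      (fun (st : PySem.Dict (String × String) Int × PySem.Dict String (List String)) x =>
        let p := (PySem.Str.split? x " ").getD []
        let head := PySem.List.pyGetD p 0 "" ++ " " ++ PySem.List.pyGetD p 1 ""
        let tail := PySem.List.pyGetD p 2 ""
        if st.1.contains (head, tail) then
          (st.1.insert (head, tail) (st.1.getD (head, tail) 0 + 1), st.2)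
        else
          (st.1.insert (head, tail) 1, st.2.modify head [] (fun l => l ++ [tail])))
      (PySem.Dict.empty, PySem.Dict.empty))
      = (pvPairs l).foldl pvStepB (PySem.Dict.empty, PySem.Dict.empty) := by
    rw [pvPairs, List.foldl_map]
    rfl
  simp only [pvHead, pvTail] at hA hB
  rw [hA, hB]
  congr 1
  rw [pvAfold, ← pvAssemble]
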